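-- pv_equiv track=rewrite | github.com/captainconj/selah | dev/scripts/spy3_sefer_yetzirah_genome.py | format_mapping
-- ===== SOURCE A (Python) =====
-- from collections import Counter, defaultdict
--
-- def format_mapping(mapping):
--     """Pretty-print a letter→base mapping."""
--     groups = defaultdict(list)
--     for letter, base in sorted(mapping.items()):
--         groups[base].append(letter)
--     lines = []
--     for base in 'ACGT':
--         letters = groups.get(base, [])
--         lines.append(f"  {base}: {' '.join(letters)} ({len(letters)} letters)")
--     return '\n'.join(lines)
-- ===== SOURCE B (Python) =====
-- def _ins(x, ls):
--     """Insert x into the ascending list ls, keeping it ascending."""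
--     if not ls:
--         return [x]
--     if ls[0] < x:
--         return [ls[0]] + _ins(x, ls[1:])
--     return [x] + ls
--
--
-- def _line(base, ls):
--     return f"  {base}: {' '.join(ls)} ({len(ls)} letters)"
--
--
-- def format_mapping(mapping):
--     """Pretty-print a letter→base mapping."""
--     a, c, g, t = [], [], [], []
--     for letter, base in mapping.items():
--         if base == "A":
--             a = _ins(letter, a)
--         elif base == "C":
--             c = _ins(letter, c)
--         elif base == "G":
--             g = _ins(letter, g)
--         elif base == "T":
--             t = _ins(letter, t)
--     return "\n".join([_line("A", a), _line("C", c), _line("G", g), _line("T", t)])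
-- ===== Notes on version B (the rewrite author's own statement) =====
-- stated objective: alternative
-- what changed: Replaces the global sort of all items plus a defaultdict grouping pass with a single pass that routes each letter into one of four per-base lists kept ascending by sorted insertion; no global sort and no dict are built.
import Mathlib
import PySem

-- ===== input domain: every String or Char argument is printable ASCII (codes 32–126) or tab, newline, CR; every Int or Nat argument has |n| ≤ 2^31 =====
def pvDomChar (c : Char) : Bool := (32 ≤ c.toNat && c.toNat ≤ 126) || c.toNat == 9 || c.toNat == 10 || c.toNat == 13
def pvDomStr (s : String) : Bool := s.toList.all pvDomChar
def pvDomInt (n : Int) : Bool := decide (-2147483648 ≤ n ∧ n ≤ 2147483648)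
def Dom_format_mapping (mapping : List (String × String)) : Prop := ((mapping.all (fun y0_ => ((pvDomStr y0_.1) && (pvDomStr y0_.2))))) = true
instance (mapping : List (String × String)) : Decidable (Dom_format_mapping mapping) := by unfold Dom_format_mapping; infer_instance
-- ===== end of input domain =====

-- B replaces A's global sort + defaultdict grouping with a single pass that maintains four
-- ascending letter lists (one per base) via recursive sorted insertion (objective: alternative).


-- ===== PORT A =====
-- 'for base in "ACGT"' iterates the four 1-character strings "A","C","G","T" (exact).
def format_mapping (mapping : List (String × String)) : String :=
  -- groups = defaultdict(list); for letter, base in sorted(mapping.items()): groups[base].append(letter)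
  let groups : PySem.Dict String (List String) :=
    (PySem.List.sorted2 mapping Prod.fst Prod.snd).foldl
      (fun g p => g.modify p.2 [] (fun ls => ls ++ [p.1])) PySem.Dict.empty
  -- lines = []; for base in 'ACGT': letters = groups.get(base, []); lines.append(f"  {base}: {' '.join(letters)} ({len(letters)} letters)")
  let lines := (["A", "C", "G", "T"]).foldl
    (fun acc base =>
      let letters := groups.getD base []
      acc ++ ["  " ++ base ++ ": " ++ PySem.Str.join " " letters ++ " (" ++
              PySem.Int.toStr (PySem.List.len letters) ++ " letters)"]) []
  PySem.Str.join "\n" lines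

-- ===== PORT B =====
-- _ins(x, ls): recursive sorted insertion into an ascending list
def pvIns (x : String) : List String → List String
  | [] => [x]
  | y :: ys => if y < x then y :: pvIns x ys else x :: y :: ys

-- _line(base, ls)
def pvLine (base : String) (ls : List String) : String :=
  "  " ++ base ++ ": " ++ PySem.Str.join " " ls ++ " (" ++
    PySem.Int.toStr (PySem.List.len ls) ++ " letters)"

def format_mapping_alt (mapping : List (String × String)) : String :=
  -- a, c, g, t = [], [], [], []; one pass: insert each letter into its base's list
  let st := mapping.foldl
    (fun (s : List String × List String × List String × List String) p =>
      if p.2 == "A" then (pvIns p.1 s.1, s.2.1, s.2.2.1, s.2.2.2)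
      else if p.2 == "C" then (s.1, pvIns p.1 s.2.1, s.2.2.1, s.2.2.2)
      else if p.2 == "G" then (s.1, s.2.1, pvIns p.1 s.2.2.1, s.2.2.2)
      else if p.2 == "T" then (s.1, s.2.1, s.2.2.1, pvIns p.1 s.2.2.2)
      else s)
    ([], [], [], [])
  PySem.Str.join "\n"
    [pvLine "A" st.1, pvLine "C" st.2.1, pvLine "G" st.2.2.1, pvLine "T" st.2.2.2]

-- ===== PRECONDITION & SPEC =====
def Spec_format_mapping (mapping : List (String × String)) (out : String) : Prop := out = format_mapping_alt mapping
instance (mapping : List (String × String)) (out : String) : Decidable (Spec_format_mapping mapping out) := by unfold Spec_format_mapping; infer_instance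

-- ===== CLAIM =====
def Claim_equal_format_mapping : Prop := ∀ (mapping : List (String × String)), Dom_format_mapping mapping → Spec_format_mapping mapping (format_mapping mapping)

-- ===== LEMMAS AND PROOFS =====

-- the strict lexicographic comparison that sorted2 with keys fst, snd performs
def pvLexLt (a b : String × String) : Bool :=
  decide (a.1 < b.1) || (!decide (b.1 < a.1) && decide (a.2 < b.2))

theorem pvLexLt_asymm (a b : String × String) (h : pvLexLt a b = true) : pvLexLt b a = false := by
  simp [pvLexLt] at *
  rcases h with h | ⟨h1, h2⟩
  · exact ⟨h.le, fun hba => absurd h (not_lt_of_ge hba)⟩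
  · exact ⟨h1, fun _ => h2.le⟩

theorem pvLexLt_negtrans (a b c : String × String)
    (hba : pvLexLt b a = false) (hcb : pvLexLt c b = false) : pvLexLt c a = false := by
  simp [pvLexLt] at *
  refine ⟨le_trans hba.1 hcb.1, fun hca => ?_⟩
  exact le_trans (hba.2 (le_trans hcb.1 hca)) (hcb.2 (le_trans hca hba.1))

theorem pvLexLt_le_fst (a b : String × String) (h : pvLexLt b a = false) : a.1 ≤ b.1 := by
  simp [pvLexLt] at h
  exact String.le_iff_toList_le.mpr h.1

theorem insertBy_pairwise_R {α : Type} (lt : α → α → Bool)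
    (hasymm : ∀ a b, lt a b = true → lt b a = false)
    (htrans : ∀ a b c, lt b a = false → lt c b = false → lt c a = false)
    (x : α) (ys : List α)
    (hys : ys.Pairwise (fun a b => lt b a = false)) :
    (PySem.List.insertBy lt x ys).Pairwise (fun a b => lt b a = false) := by
  induction ys with
  | nil => simp [PySem.List.insertBy]
  | cons y ys ih =>
    rcases List.pairwise_cons.mp hys with ⟨hy, hys'⟩
    by_cases h : lt x y = true
    · rw [show PySem.List.insertBy lt x (y :: ys) = x :: y :: ys by
        simp [PySem.List.insertBy, h]]
      refine List.Pairwise.cons ?_ (List.Pairwise.cons hy hys')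
      intro z hz
      rcases List.mem_cons.mp hz with rfl | hz
      · exact hasymm _ _ h
      · exact htrans _ _ _ (hasymm _ _ h) (hy z hz)
    · rw [show PySem.List.insertBy lt x (y :: ys) = y :: PySem.List.insertBy lt x ys by
        simp only [PySem.List.insertBy]; rw [if_neg h]]
      refine List.Pairwise.cons ?_ (ih hys')
      intro z hz
      rcases (PySem.List.insertBy_mem_iff lt x z ys).1 hz with rfl | hz
      · exact Bool.eq_false_iff.mpr h
      · exact hy z hz

theorem foldl_insertBy_pairwise_R {α : Type} (lt : α → α → Bool)
    (hasymm : ∀ a b, lt a b = true → lt b a = false)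
    (htrans : ∀ a b c, lt b a = false → lt c b = false → lt c a = false)
    (xs acc : List α)
    (hacc : acc.Pairwise (fun a b => lt b a = false)) :
    (xs.foldl (fun acc x => PySem.List.insertBy lt x acc) acc).Pairwise
      (fun a b => lt b a = false) := by
  induction xs generalizing acc with
  | nil => exact hacc
  | cons x xs ih =>
    exact ih _ (insertBy_pairwise_R lt hasymm htrans x acc hacc)

theorem sorted2_pairwise (xs : List (String × String)) :
    (PySem.List.sorted2 xs Prod.fst Prod.snd).Pairwise (fun a b => pvLexLt b a = false) := by
  show (xs.foldl (fun acc x => PySem.List.insertBy pvLexLt x acc) []).Pairwise _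
  exact foldl_insertBy_pairwise_R pvLexLt pvLexLt_asymm pvLexLt_negtrans xs [] (by simp)

-- A's group for a base is the sorted list of that base's letters
theorem group_eq_sorted (mapping : List (String × String)) (base : String) :
    ((PySem.List.sorted2 mapping Prod.fst Prod.snd).foldl
        (fun g p => g.modify p.2 [] (fun ls => ls ++ [p.1])) PySem.Dict.empty).getD base []
      = PySem.List.sorted ((mapping.filter (fun p => p.2 == base)).map Prod.fst) (fun x => x) := by
  have hswap : (PySem.List.sorted2 mapping Prod.fst Prod.snd).foldl
      (fun g p => g.modify p.2 [] (fun ls => ls ++ [p.1])) PySem.Dict.empty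
      = ((PySem.List.sorted2 mapping Prod.fst Prod.snd).map (fun p => (p.2, p.1))).foldl
        (fun g q => g.modify q.1 [] (fun ls => ls ++ [q.2])) PySem.Dict.empty := by
    rw [List.foldl_map]
  rw [hswap, PySem.Dict.getD_foldl_modify_append, PySem.Dict.getD_empty, List.nil_append]
  have hG : (((PySem.List.sorted2 mapping Prod.fst Prod.snd).map (fun p => (p.2, p.1))).filter
        (fun p => p.1 == base)).map (fun p => p.2)
      = ((PySem.List.sorted2 mapping Prod.fst Prod.snd).filter (fun p => p.2 == base)).map Prod.fst := by
    rw [List.filter_map, List.map_map]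
    rfl
  rw [hG]
  refine (PySem.List.sorted_id_eq_of_perm_of_pairwise _ _ ?_ ?_).symm
  · exact ((PySem.List.sorted2_perm mapping Prod.fst Prod.snd false).filter _).map _
  · refine List.pairwise_map.mpr ?_
    exact ((sorted2_pairwise mapping).filter _).imp (fun h => pvLexLt_le_fst _ _ h)

-- B's sorted insertion: permutation and order preservation
theorem pvIns_cons_pos (x y : String) (ys : List String) (h : y < x) :
    pvIns x (y :: ys) = y :: pvIns x ys := by
  simp only [pvIns]; rw [if_pos h]

theorem pvIns_cons_neg (x y : String) (ys : List String) (h : ¬ y < x) :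
    pvIns x (y :: ys) = x :: y :: ys := by
  simp only [pvIns]; rw [if_neg h]

theorem pvIns_perm (x : String) (ls : List String) : (pvIns x ls).Perm (x :: ls) := by
  induction ls with
  | nil => simp [pvIns]
  | cons y ys ih =>
    by_cases h : y < x
    · rw [pvIns_cons_pos x y ys h]
      exact (ih.cons y).trans (List.Perm.swap x y ys)
    · rw [pvIns_cons_neg x y ys h]

theorem pvIns_pairwise (x : String) (ls : List String)
    (h : ls.Pairwise (· ≤ ·)) : (pvIns x ls).Pairwise (· ≤ ·) := by
  induction ls with
  | nil => simp [pvIns]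
  | cons y ys ih =>
    rcases List.pairwise_cons.mp h with ⟨hy, hys⟩
    by_cases hlt : y < x
    · rw [pvIns_cons_pos x y ys hlt]
      refine List.pairwise_cons.mpr ⟨?_, ih hys⟩
      intro z hz
      rcases List.mem_cons.mp ((pvIns_perm x ys).mem_iff.1 hz) with hzx | hz
      · exact hzx ▸ hlt.le
      · exact hy z hz
    · rw [pvIns_cons_neg x y ys hlt]
      refine List.pairwise_cons.mpr ⟨?_, List.pairwise_cons.mpr ⟨hy, hys⟩⟩
      intro z hz
      rcases List.mem_cons.mp hz with rfl | hz
      · exact le_of_not_gt hlt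
      · exact le_trans (le_of_not_gt hlt) (hy z hz)

-- the per-base bucket B maintains, as a single fold
def pvBucket (b : String) (m : List (String × String)) (acc : List String) : List String :=
  m.foldl (fun acc p => if p.2 == b then pvIns p.1 acc else acc) acc

theorem pvBucket_cons_pos (b : String) (p : String × String) (m : List (String × String))
    (acc : List String) (h : (p.2 == b) = true) :
    pvBucket b (p :: m) acc = pvBucket b m (pvIns p.1 acc) := by
  unfold pvBucket; rw [List.foldl_cons, if_pos h]

theorem pvBucket_cons_neg (b : String) (p : String × String) (m : List (String × String))
    (acc : List String) (h : (p.2 == b) = false) :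
    pvBucket b (p :: m) acc = pvBucket b m acc := by
  unfold pvBucket; rw [List.foldl_cons, if_neg (by simp [h])]

theorem pvBucket_perm (b : String) (m : List (String × String)) (acc : List String) :
    (pvBucket b m acc).Perm ((m.filter (fun p => p.2 == b)).map Prod.fst ++ acc) := by
  induction m generalizing acc with
  | nil => simp [pvBucket]
  | cons p m ih =>
    by_cases h : (p.2 == b) = true
    · rw [pvBucket_cons_pos b p m acc h]
      refine (ih (pvIns p.1 acc)).trans ?_
      rw [show List.filter (fun p => p.2 == b) (p :: m)
            = p :: List.filter (fun p => p.2 == b) m from List.filter_cons_of_pos h,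
          List.map_cons]
      exact ((pvIns_perm p.1 acc).append_left _).trans List.perm_middle
    · rw [pvBucket_cons_neg b p m acc (Bool.eq_false_iff.mpr h)]
      rw [show List.filter (fun p => p.2 == b) (p :: m)
            = List.filter (fun p => p.2 == b) m from List.filter_cons_of_neg (by simpa using h)]
      exact ih acc

theorem pvBucket_pairwise (b : String) (m : List (String × String)) (acc : List String)
    (hacc : acc.Pairwise (· ≤ ·)) : (pvBucket b m acc).Pairwise (· ≤ ·) := by
  induction m generalizing acc with
  | nil => exact hacc
  | cons p m ih =>
    by_cases h : (p.2 == b) = true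
    · rw [pvBucket_cons_pos b p m acc h]
      exact ih _ (pvIns_pairwise p.1 acc hacc)
    · rw [pvBucket_cons_neg b p m acc (Bool.eq_false_iff.mpr h)]
      exact ih _ hacc

theorem pvBucket_eq_sorted (b : String) (m : List (String × String)) :
    PySem.List.sorted ((m.filter (fun p => p.2 == b)).map Prod.fst) (fun x => x)
      = pvBucket b m [] := by
  refine PySem.List.sorted_id_eq_of_perm_of_pairwise _ _ ?_ ?_
  · simpa using pvBucket_perm b m []
  · exact pvBucket_pairwise b m [] (by simp)

-- B's 4-tuple fold decomposes into four independent buckets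
theorem st_split (m : List (String × String))
    (a c g t : List String) :
    m.foldl
      (fun (s : List String × List String × List String × List String) p =>
        if p.2 == "A" then (pvIns p.1 s.1, s.2.1, s.2.2.1, s.2.2.2)
        else if p.2 == "C" then (s.1, pvIns p.1 s.2.1, s.2.2.1, s.2.2.2)
        else if p.2 == "G" then (s.1, s.2.1, pvIns p.1 s.2.2.1, s.2.2.2)
        else if p.2 == "T" then (s.1, s.2.1, s.2.2.1, pvIns p.1 s.2.2.2)
        else s)
      (a, c, g, t)
    = (pvBucket "A" m a, pvBucket "C" m c, pvBucket "G" m g, pvBucket "T" m t) := by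
  induction m generalizing a c g t with
  | nil => simp [pvBucket]
  | cons p m ih =>
    rw [List.foldl_cons]
    by_cases hA : (p.2 == "A") = true
    · have h2 : p.2 = "A" := by simpa using hA
      rw [if_pos hA, ih, pvBucket_cons_pos _ p m _ hA,
          pvBucket_cons_neg _ p m _ (by simp [h2]), pvBucket_cons_neg _ p m _ (by simp [h2]),
          pvBucket_cons_neg _ p m _ (by simp [h2])]
    · rw [if_neg hA]
      by_cases hC : (p.2 == "C") = true
      · have h2 : p.2 = "C" := by simpa using hC
        rw [if_pos hC, ih, pvBucket_cons_pos _ p m _ hC,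
            pvBucket_cons_neg _ p m _ (by simp [h2]), pvBucket_cons_neg _ p m _ (by simp [h2]),
            pvBucket_cons_neg _ p m _ (by simp [h2])]
      · rw [if_neg hC]
        by_cases hG : (p.2 == "G") = true
        · have h2 : p.2 = "G" := by simpa using hG
          rw [if_pos hG, ih, pvBucket_cons_pos _ p m _ hG,
              pvBucket_cons_neg _ p m _ (by simp [h2]), pvBucket_cons_neg _ p m _ (by simp [h2]),
              pvBucket_cons_neg _ p m _ (by simp [h2])]
        · rw [if_neg hG]
          by_cases hT : (p.2 == "T") = true
          · have h2 : p.2 = "T" := by simpa using hT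
            rw [if_pos hT, ih, pvBucket_cons_pos _ p m _ hT,
                pvBucket_cons_neg _ p m _ (by simp [h2]), pvBucket_cons_neg _ p m _ (by simp [h2]),
                pvBucket_cons_neg _ p m _ (by simp [h2])]
          · rw [if_neg hT, ih, pvBucket_cons_neg _ p m _ (Bool.eq_false_iff.mpr hA),
                pvBucket_cons_neg _ p m _ (Bool.eq_false_iff.mpr hC),
                pvBucket_cons_neg _ p m _ (Bool.eq_false_iff.mpr hG),
                pvBucket_cons_neg _ p m _ (Bool.eq_false_iff.mpr hT)]

-- ===== VERDICT =====
theorem format_mapping_spec : Claim_equal_format_mapping := by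
  intro mapping _
  unfold Spec_format_mapping format_mapping format_mapping_alt
  simp only [List.foldl, st_split, pvLine]
  rw [group_eq_sorted mapping "A", group_eq_sorted mapping "C",
      group_eq_sorted mapping "G", group_eq_sorted mapping "T",
      pvBucket_eq_sorted, pvBucket_eq_sorted, pvBucket_eq_sorted, pvBucket_eq_sorted]
  rfl
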